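-- pv_equiv track=rewrite | github.com/davibernardes035/reu-puzzle | reuAstarv2.py | get_all_pieces_coords
-- ===== SOURCE A (Python) =====
-- def get_all_pieces_coords(board):
--     pieces = {}
--     rows, cols = len(board), len(board[0])
--     for r in range(rows):
--         for c in range(cols):
--             val = board[r][c]
--             if val != 0:
--                 if val not in pieces:
--                     pieces[val] = []
--                 pieces[val].append((r, c))
--     for val in pieces:
--         pieces[val].sort()
--     return pieces
-- ===== SOURCE B (Python) =====
-- def get_all_pieces_coords(board):
--     rows, cols = len(board), len(board[0])
--     seen = set()
--     order = []
--     for r in range(rows):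
--         for c in range(cols):
--             v = board[r][c]
--             if v != 0 and v not in seen:
--                 seen.add(v)
--                 order.append(v)
--     return {v: [(r, c) for r in range(rows) for c in range(cols) if board[r][c] == v]
--             for v in order}
-- ===== Notes on version B (the rewrite author's own statement) =====
-- stated objective: alternative
-- what changed: A groups coordinates into a dict during one row-major pass and then sorts each value list; B first collects the distinct nonzero values in first-appearance order, then builds the result by rescanning the board once per value with a comprehension (per-key scan, no incremental dict grouping and no sort pass).
import Mathlib
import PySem

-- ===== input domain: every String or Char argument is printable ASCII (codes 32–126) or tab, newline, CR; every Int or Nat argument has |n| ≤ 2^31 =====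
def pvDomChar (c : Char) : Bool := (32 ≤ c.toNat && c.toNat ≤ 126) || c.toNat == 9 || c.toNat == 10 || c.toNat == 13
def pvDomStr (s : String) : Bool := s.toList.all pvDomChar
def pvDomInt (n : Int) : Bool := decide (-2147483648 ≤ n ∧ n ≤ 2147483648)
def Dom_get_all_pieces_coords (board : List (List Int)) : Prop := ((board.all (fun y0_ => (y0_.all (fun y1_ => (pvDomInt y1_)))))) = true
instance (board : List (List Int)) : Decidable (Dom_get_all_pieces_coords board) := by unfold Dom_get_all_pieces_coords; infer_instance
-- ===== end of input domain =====

-- B first collects the distinct nonzero values in first-appearance order, then builds the result by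
-- rescanning the board once per value with a comprehension — no incremental dict grouping and no
-- sort pass (row-major rescans yield already-sorted coordinate lists).  Objective: alternative.
-- Both Pythons raise IndexError on an empty board or a row shorter than row 0 (outside Pre_).

-- ===== PORT A =====
def get_all_pieces_coords (board : List (List Int)) : List (Int × List (Int × Int)) :=
  let rows : Int := PySem.List.len board
  let cols : Int := PySem.List.len (PySem.List.pyGetD board 0 [])
  let pieces : PySem.Dict Int (List (Int × Int)) :=
    (PySem.List.pyRange 0 rows).foldl (fun pieces r =>
      (PySem.List.pyRange 0 cols).foldl (fun pieces c =>
        let val := PySem.List.pyGetD (PySem.List.pyGetD board r []) c 0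
        if val ≠ 0 then
          let pieces := if pieces.contains val then pieces else pieces.insert val []
          pieces.modify val [] (fun l => l ++ [(r, c)])
        else pieces) pieces) PySem.Dict.empty
  pieces.items.map (fun p => (p.1, PySem.List.sorted2 p.2 Prod.fst Prod.snd))
  -- 'for val in pieces: pieces[val].sort()' — sort each entry's list in place, dict order unchanged

-- ===== PORT B =====
def get_all_pieces_coords_alt (board : List (List Int)) : List (Int × List (Int × Int)) :=
  let rows : Int := PySem.List.len board
  let cols : Int := PySem.List.len (PySem.List.pyGetD board 0 [])
  let st :=
    (PySem.List.pyRange 0 rows).foldl (fun st r =>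
      (PySem.List.pyRange 0 cols).foldl (fun st c =>
        let v := PySem.List.pyGetD (PySem.List.pyGetD board r []) c 0
        if v ≠ 0 ∧ ¬ PySem.Set.contains st.1 v then (PySem.Set.add st.1 v, st.2 ++ [v])
        else st) st) ((PySem.Set.empty : PySem.Set Int), ([] : List Int))
  st.2.map (fun v => (v,
    (PySem.List.pyRange 0 rows).flatMap (fun r =>
      ((PySem.List.pyRange 0 cols).filter (fun c =>
        PySem.List.pyGetD (PySem.List.pyGetD board r []) c 0 == v)).map (fun c => (r, c)))))

-- ===== PRECONDITION & SPEC =====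
-- Pre_ excludes exactly the inputs on which the Python A raises IndexError: the empty board
-- (board[0]) and boards where some row is shorter than row 0 (board[r][c] with c < len(board[0])).
def Pre_get_all_pieces_coords (board : List (List Int)) : Prop :=
  board ≠ [] ∧ ∀ row ∈ board, (board.headD []).length ≤ row.length
instance (board : List (List Int)) : Decidable (Pre_get_all_pieces_coords board) := by
  unfold Pre_get_all_pieces_coords; infer_instance
def pvWitness_get_all_pieces_coords : List (List Int) := [[1, 0], [0, 2]]
def Spec_get_all_pieces_coords (board : List (List Int)) (out : List (Int × List (Int × Int))) : Prop := out = get_all_pieces_coords_alt board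
instance (board : List (List Int)) (out : List (Int × List (Int × Int))) : Decidable (Spec_get_all_pieces_coords board out) := by unfold Spec_get_all_pieces_coords; infer_instance

-- ===== CLAIM (what is proved, stated in full; the proofs are below) =====
def Claim_equal_get_all_pieces_coords : Prop := ∀ (board : List (List Int)), Dom_get_all_pieces_coords board → Pre_get_all_pieces_coords board → Spec_get_all_pieces_coords board (get_all_pieces_coords board)

-- ===== LEMMAS AND PROOFS =====
def pvStep (d : PySem.Dict Int (List (Int × Int))) (t : Int × Int × Int) : PySem.Dict Int (List (Int × Int)) :=
  if t.2.2 ≠ 0 then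
    (if d.contains t.2.2 then d else d.insert t.2.2 []).modify t.2.2 [] (fun l => l ++ [(t.1, t.2.1)])
  else d
def pvStep2 (st : PySem.Set Int × List Int) (t : Int × Int × Int) : PySem.Set Int × List Int :=
  if t.2.2 ≠ 0 ∧ ¬ PySem.Set.contains st.1 t.2.2 then (PySem.Set.add st.1 t.2.2, st.2 ++ [t.2.2])
  else st
def pvKeys (L : List (Int × Int × Int)) : List Int :=
  PySem.Set.ofList ((L.filter (fun t => t.2.2 ≠ 0)).map (fun t => t.2.2))
def pvGroup (L : List (Int × Int × Int)) (v : Int) : List (Int × Int) :=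
  (L.filter (fun t => t.2.2 == v)).map (fun t => (t.1, t.2.1))
theorem pvKeys_ne_zero {L : List (Int × Int × Int)} {v : Int} (h : v ∈ pvKeys L) : v ≠ 0 := by
  unfold pvKeys at h
  rw [PySem.Set.mem_ofList] at h
  obtain ⟨t, ht, rfl⟩ := List.mem_map.mp h
  have := List.of_mem_filter ht
  simpa using this
theorem pvKeys_mem_iff {L : List (Int × Int × Int)} {v : Int} :
    v ∈ pvKeys L ↔ v ≠ 0 ∧ ∃ t ∈ L, t.2.2 = v := by
  unfold pvKeys
  rw [PySem.Set.mem_ofList]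
  constructor
  · rintro h
    obtain ⟨t, ht, rfl⟩ := List.mem_map.mp h
    have h1 := List.of_mem_filter ht
    exact ⟨by simpa using h1, t, List.mem_of_mem_filter ht, rfl⟩
  · rintro ⟨hv, t, ht, rfl⟩
    exact List.mem_map.mpr ⟨t, List.mem_filter.mpr ⟨ht, by simpa using hv⟩, rfl⟩
theorem pvGroup_eq_nil {L : List (Int × Int × Int)} {v : Int} (hv : v ≠ 0) (h : v ∉ pvKeys L) :
    pvGroup L v = [] := by
  unfold pvGroup
  rw [List.map_eq_nil_iff, List.filter_eq_nil_iff]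
  intro t ht hmem
  exact h (pvKeys_mem_iff.mpr ⟨hv, t, ht, by simpa using hmem⟩)

theorem pvKeys_append_zero {L : List (Int × Int × Int)} {x : Int × Int × Int} (hx : x.2.2 = 0) :
    pvKeys (L ++ [x]) = pvKeys L := by
  unfold pvKeys
  rw [List.filter_append]
  simp [List.filter, hx]

theorem pvKeys_append_nz {L : List (Int × Int × Int)} {x : Int × Int × Int} (hx : x.2.2 ≠ 0) :
    pvKeys (L ++ [x]) = PySem.Set.add (pvKeys L) x.2.2 := by
  unfold pvKeys
  rw [List.filter_append]
  rw [show List.filter (fun t => decide (t.2.2 ≠ 0)) [x] = [x] from by simp [hx]]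
  rw [List.map_append]
  exact PySem.Set.ofList_append_singleton _ _

theorem pvGroup_append_eq {L : List (Int × Int × Int)} {x : Int × Int × Int} {v : Int} (h : x.2.2 = v) :
    pvGroup (L ++ [x]) v = pvGroup L v ++ [(x.1, x.2.1)] := by
  unfold pvGroup
  rw [List.filter_append, List.map_append]
  congr 1
  simp [List.filter, h]

theorem pvGroup_append_ne {L : List (Int × Int × Int)} {x : Int × Int × Int} {v : Int} (h : x.2.2 ≠ v) :
    pvGroup (L ++ [x]) v = pvGroup L v := by
  unfold pvGroup
  rw [List.filter_append]
  simp only [List.filter]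
  simp [show (x.2.2 == v) = false from by simpa using h]

theorem pvFold_items (L : List (Int × Int × Int)) :
    (L.foldl pvStep PySem.Dict.empty).items = (pvKeys L).map (fun v => (v, pvGroup L v)) := by
  induction L using List.reverseRecOn with
  | nil => rfl
  | append_singleton L x ih =>
    rw [List.foldl_append, List.foldl_cons, List.foldl_nil]
    set D := L.foldl pvStep PySem.Dict.empty with hD
    have hkeys : D.keys = pvKeys L := by
      simp only [PySem.Dict.keys, ih, List.map_map]
      exact (List.map_congr_left fun a _ => rfl).trans (List.map_id _)
    have hnodup : D.keys.Nodup := by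
      rw [hkeys]; exact PySem.Set.nodup_ofList _
    have hcont : ∀ v : Int, D.contains v = true ↔ v ∈ pvKeys L := by
      intro v
      rw [PySem.Dict.contains_iff_mem_keys, hkeys]
    by_cases hx0 : x.2.2 = 0
    · rw [show pvStep D x = D from by simp [pvStep, hx0]]
      rw [ih, pvKeys_append_zero hx0]
      apply List.map_congr_left
      intro v hv
      rw [pvGroup_append_ne (by rw [hx0]; exact fun h => pvKeys_ne_zero hv h.symm)]
    · by_cases hv : x.2.2 ∈ pvKeys L
      · have hcv : D.contains x.2.2 = true := (hcont _).mpr hv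
        have hget : D.getD x.2.2 [] = pvGroup L x.2.2 := by
          have hmem : (x.2.2, pvGroup L x.2.2) ∈ D.items := by
            rw [ih]; exact List.mem_map.mpr ⟨x.2.2, hv, rfl⟩
          rw [PySem.Dict.getD_eq_get?_getD, PySem.Dict.get?_of_mem_items D hmem hnodup]
          rfl
        rw [show pvStep D x
            = D.insert x.2.2 (pvGroup L x.2.2 ++ [(x.1, x.2.1)]) from by
          simp [pvStep, hx0, hcv, PySem.Dict.modify, hget]]
        rw [PySem.Dict.items_insert_of_contains _ _ hcv, ih, List.map_map]
        rw [pvKeys_append_nz hx0, PySem.Set.add_of_mem hv]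
        apply List.map_congr_left
        intro v hvmem
        by_cases hvv : v = x.2.2
        · subst hvv
          simp [pvGroup_append_eq rfl]
        · have : (v == x.2.2) = false := by simpa using fun h => hvv h
          simp [Function.comp, this, pvGroup_append_ne (fun h => hvv h.symm)]
      · have hcv : D.contains x.2.2 = false := by
          rw [← Bool.not_eq_true, hcont]; exact hv
        have hitems' : (D.insert x.2.2 []).items = D.items ++ [(x.2.2, ([] : List (Int × Int)))] :=
          PySem.Dict.items_insert_of_not_contains _ _ hcv
        have hkeys' : (D.insert x.2.2 []).keys = D.keys ++ [x.2.2] := by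
          simp [PySem.Dict.keys, hitems']
        have hnodup' : (D.insert x.2.2 []).keys.Nodup := by
          rw [hkeys']
          refine List.Nodup.append hnodup (List.nodup_singleton _) ?_
          intro a ha hb
          rw [List.mem_singleton] at hb
          subst hb
          rw [hkeys] at ha
          exact hv ha
        have hget' : (D.insert x.2.2 []).getD x.2.2 [] = [] := by
          have hmem : (x.2.2, ([] : List (Int × Int))) ∈ (D.insert x.2.2 []).items := by
            rw [hitems']; simp
          rw [PySem.Dict.getD_eq_get?_getD, PySem.Dict.get?_of_mem_items _ hmem hnodup']
          rfl
        have hcv' : (D.insert x.2.2 []).contains x.2.2 = true := by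
          rw [PySem.Dict.contains_iff_mem_keys, hkeys']; simp
        rw [show pvStep D x
            = (D.insert x.2.2 []).insert x.2.2 [(x.1, x.2.1)] from by
          simp [pvStep, hx0, hcv, PySem.Dict.modify, hget']]
        rw [PySem.Dict.items_insert_of_contains _ _ hcv', hitems']
        rw [List.map_append]
        have hleft : D.items.map (fun p => if (p.1 == x.2.2) = true then (x.2.2, [(x.1, x.2.1)]) else p) = D.items := by
          conv_rhs => rw [← List.map_id D.items]
          apply List.map_congr_left
          intro p hp
          have hp1 : p.1 ∈ pvKeys L := by
            rw [← hkeys]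
            exact List.mem_map.mpr ⟨p, hp, rfl⟩
          have : (p.1 == x.2.2) = false := by
            apply beq_eq_false_iff_ne.mpr
            intro h
            exact hv (h ▸ hp1)
          simp [this, id]
        rw [hleft, ih]
        rw [pvKeys_append_nz hx0, PySem.Set.add_of_not_mem hv, List.map_append]
        congr 1
        · apply List.map_congr_left
          intro v hvmem
          rw [pvGroup_append_ne (fun h => hv (h ▸ hvmem))]
        · simp [pvGroup_append_eq rfl, pvGroup_eq_nil hx0 hv]

def pvCells (board : List (List Int)) : List (Int × Int × Int) :=
  (PySem.List.pyRange 0 (PySem.List.len board)).flatMap (fun r =>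
    (PySem.List.pyRange 0 (PySem.List.len (PySem.List.pyGetD board 0 []))).map (fun c =>
      (r, c, PySem.List.pyGetD (PySem.List.pyGetD board r []) c 0)))

def pvLex (a b : Int × Int) : Prop := a.1 < b.1 ∨ (a.1 = b.1 ∧ a.2 < b.2)

theorem pvSorted2_eq_self {xs : List (Int × Int)} (h : xs.Pairwise pvLex) :
    PySem.List.sorted2 xs Prod.fst Prod.snd = xs := by
  induction xs using List.reverseRecOn with
  | nil => rfl
  | append_singleton xs x ih =>
    have hparts := List.pairwise_append.mp h
    have hxs := hparts.1
    have hall : ∀ y ∈ xs, pvLex y x := fun y hy => hparts.2.2 y hy x (by simp)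
    have hstep : PySem.List.sorted2 (xs ++ [x]) Prod.fst Prod.snd
        = PySem.List.insertBy
            (fun a b => decide (a.1 < b.1) || (!decide (b.1 < a.1) && decide (a.2 < b.2)))
            x (PySem.List.sorted2 xs Prod.fst Prod.snd) := by
      simp [PySem.List.sorted2, List.foldl_append]
    rw [hstep, ih hxs]
    rw [PySem.List.insertBy_of_forall_not_before]
    intro y hy
    rcases hall y hy with h1 | ⟨h1, h2⟩ <;> simp <;> omega

theorem pvCells_pairwise (board : List (List Int)) :
    (pvCells board).Pairwise (fun a b => pvLex (a.1, a.2.1) (b.1, b.2.1)) := by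
  unfold pvCells
  rw [List.flatMap_def, List.pairwise_flatten]
  constructor
  · intro l hl
    obtain ⟨r, _, rfl⟩ := List.mem_map.mp hl
    rw [List.pairwise_map]
    refine (PySem.List.pairwise_lt_pyRange_one 0 _).imp ?_
    intro c1 c2 hc
    exact Or.inr ⟨rfl, hc⟩
  · rw [List.pairwise_map]
    refine (PySem.List.pairwise_lt_pyRange_one 0 _).imp ?_
    intro r1 r2 hr x hx y hy
    obtain ⟨c1, _, rfl⟩ := List.mem_map.mp hx
    obtain ⟨c2, _, rfl⟩ := List.mem_map.mp hy
    exact Or.inl hr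
theorem pvA_eq (board : List (List Int)) :
    get_all_pieces_coords board
      = (pvKeys (pvCells board)).map (fun v => (v, pvGroup (pvCells board) v)) := by
  have hfold : (PySem.List.pyRange 0 (PySem.List.len board)).foldl (fun pieces r =>
      (PySem.List.pyRange 0 (PySem.List.len (PySem.List.pyGetD board 0 []))).foldl (fun pieces c =>
        let val := PySem.List.pyGetD (PySem.List.pyGetD board r []) c 0
        if val ≠ 0 then
          let pieces := if pieces.contains val then pieces else pieces.insert val []
          pieces.modify val [] (fun l => l ++ [(r, c)])
        else pieces) pieces) PySem.Dict.empty
      = (pvCells board).foldl pvStep PySem.Dict.empty := by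
    unfold pvCells
    rw [List.foldl_flatMap]
    simp only [List.foldl_map]
    rfl
  show (_ : List (Int × List (Int × Int))) = _
  unfold get_all_pieces_coords
  simp only []
  rw [hfold, pvFold_items, List.map_map]
  apply List.map_congr_left
  intro v hv
  have hp : (pvGroup (pvCells board) v).Pairwise pvLex := by
    unfold pvGroup
    rw [List.pairwise_map]
    exact ((pvCells_pairwise board).filter _).imp (fun h => h)
  simp [Function.comp, pvSorted2_eq_self hp]

theorem pvFold2 (L : List (Int × Int × Int)) :
    L.foldl pvStep2 ((PySem.Set.empty : PySem.Set Int), ([] : List Int))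
      = (pvKeys L, pvKeys L) := by
  induction L using List.reverseRecOn with
  | nil => rfl
  | append_singleton L x ih =>
    rw [List.foldl_append, List.foldl_cons, List.foldl_nil, ih]
    by_cases hx0 : x.2.2 = 0
    · rw [show pvStep2 (pvKeys L, pvKeys L) x = (pvKeys L, pvKeys L) from by
        simp [pvStep2, hx0]]
      rw [pvKeys_append_zero hx0]
    · by_cases hv : x.2.2 ∈ pvKeys L
      · rw [show pvStep2 (pvKeys L, pvKeys L) x = (pvKeys L, pvKeys L) from by
          simp [pvStep2]; exact fun _ => hv]
        rw [pvKeys_append_nz hx0, PySem.Set.add_of_mem hv]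
      · rw [show pvStep2 (pvKeys L, pvKeys L) x
            = (PySem.Set.add (pvKeys L) x.2.2, pvKeys L ++ [x.2.2]) from by
          simp [pvStep2, hx0]; exact hv]
        rw [pvKeys_append_nz hx0, PySem.Set.add_of_not_mem hv]

theorem pvGroup_scan (board : List (List Int)) (v : Int) :
    (PySem.List.pyRange 0 (PySem.List.len board)).flatMap (fun r =>
      ((PySem.List.pyRange 0 (PySem.List.len (PySem.List.pyGetD board 0 []))).filter (fun c =>
        PySem.List.pyGetD (PySem.List.pyGetD board r []) c 0 == v)).map (fun c => (r, c)))
      = pvGroup (pvCells board) v := by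
  unfold pvGroup pvCells
  rw [List.filter_flatMap, List.map_flatMap]
  congr 1
  funext r
  rw [List.filter_map, List.map_map]
  rfl

theorem pvB_eq (board : List (List Int)) :
    get_all_pieces_coords_alt board
      = (pvKeys (pvCells board)).map (fun v => (v, pvGroup (pvCells board) v)) := by
  have hfold : (PySem.List.pyRange 0 (PySem.List.len board)).foldl (fun st r =>
      (PySem.List.pyRange 0 (PySem.List.len (PySem.List.pyGetD board 0 []))).foldl (fun st c =>
        let v := PySem.List.pyGetD (PySem.List.pyGetD board r []) c 0
        if v ≠ 0 ∧ ¬ PySem.Set.contains st.1 v then (PySem.Set.add st.1 v, st.2 ++ [v])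
        else st) st) ((PySem.Set.empty : PySem.Set Int), ([] : List Int))
      = (pvCells board).foldl pvStep2 ((PySem.Set.empty : PySem.Set Int), ([] : List Int)) := by
    unfold pvCells
    rw [List.foldl_flatMap]
    simp only [List.foldl_map]
    rfl
  show (_ : List (Int × List (Int × Int))) = _
  unfold get_all_pieces_coords_alt
  simp only []
  rw [hfold, pvFold2]
  apply List.map_congr_left
  intro v _
  rw [pvGroup_scan]

-- ===== VERDICT (by name: the statement is the Claim_ definition above) =====
theorem get_all_pieces_coords_spec : Claim_equal_get_all_pieces_coords := by
  intro board _ _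
  unfold Spec_get_all_pieces_coords
  rw [pvA_eq, pvB_eq]
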